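-- pv_equiv track=rewrite | github.com/alexpill/advent-of-code | 2024/4/ceres_search.py | check_neighbors2
-- ===== SOURCE A (Python) =====
-- def check_unit(x, y, values, unitRef):
--     if x < 0 or y < 0 or y >= len(values) or x >= len(values[0]):
--         return False
--     return values[y][x] == unitRef
--
-- def check_neighbors2(values, x, y, ref):
--     found = [0] * 4
--     for i in range(-int(len(ref) / 2), int(len(ref) / 2) + 1):
--         if check_unit(x + i, y + i, values, ref[i + int(len(ref) / 2)]):
--             found[0] += 1
--         if check_unit(x - i, y - i, values, ref[i + int(len(ref) / 2)]):
--             found[1] += 1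
--         if check_unit(x + i, y - i, values, ref[i + int(len(ref) / 2)]):
--             found[2] += 1
--         if check_unit(x - i, y + i, values, ref[i + int(len(ref) / 2)]):
--             found[3] += 1
--     return len(list(filter(lambda x: x == len(ref), found))) >= 2
-- ===== SOURCE B (Python) =====
-- def check_neighbors2(values, x, y, ref):
--     half = len(ref) // 2
--     height = len(values)
--     width = len(values[0]) if values else 0
--
--     def cell(cx, cy):
--         if 0 <= cx < width and 0 <= cy < height:
--             return values[cy][cx]
--         return None
--
--     idxs = range(-half, half + 1)
--     d_main = [cell(x + i, y + i) for i in idxs]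
--     d_anti = [cell(x + i, y - i) for i in idxs]
--     target = list(ref)
--     count = ((d_main == target) + (d_main == target[::-1])
--              + (d_anti == target) + (d_anti == target[::-1]))
--     return count >= 2
-- ===== Notes on version B (the rewrite author's own statement) =====
-- stated objective: simpler
-- what changed: B extracts the two diagonal windows around (x,y) as whole lists once and compares each against ref forwards and backwards (2 extractions + 4 list comparisons), instead of A's loop maintaining four interleaved per-character match counters each compared to len(ref) at the end.
import Mathlib
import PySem

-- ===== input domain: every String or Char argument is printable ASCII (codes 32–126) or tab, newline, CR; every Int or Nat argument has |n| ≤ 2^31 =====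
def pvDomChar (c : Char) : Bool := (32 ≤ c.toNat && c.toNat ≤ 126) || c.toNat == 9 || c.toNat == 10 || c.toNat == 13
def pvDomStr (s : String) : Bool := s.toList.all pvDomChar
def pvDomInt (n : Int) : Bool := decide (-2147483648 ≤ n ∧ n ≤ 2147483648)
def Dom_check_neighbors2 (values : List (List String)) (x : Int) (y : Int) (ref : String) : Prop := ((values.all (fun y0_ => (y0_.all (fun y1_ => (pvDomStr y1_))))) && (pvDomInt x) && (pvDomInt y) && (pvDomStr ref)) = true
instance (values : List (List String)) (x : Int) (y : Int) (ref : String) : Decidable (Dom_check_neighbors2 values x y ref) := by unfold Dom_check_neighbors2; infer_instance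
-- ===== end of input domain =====

-- B extracts the two diagonal windows as lists and compares each with ref forwards and backwards,
-- replacing A's four per-character counters (objective: simpler decomposition, same cost).

-- ===== PORT A =====
def check_unit (x : Int) (y : Int) (values : List (List String)) (unitRef : Option String) : Bool :=
  -- values[y][x] is ported by the two bounds-checked Python index operations; under the
  -- guard the row index is in range, so `headD []` is Python's values[0] on the taken path.
  if x < 0 ∨ y < 0 ∨ (values.length : Int) ≤ y ∨ ((values.headD []).length : Int) ≤ x then
    false
  else
    ((PySem.List.pyGet? values y).bind (fun row => PySem.List.pyGet? row x)) == unitRef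

def check_neighbors2 (values : List (List String)) (x : Int) (y : Int) (ref : String) : Bool :=
  let h : Int := PySem.Int.floordiv (PySem.Str.len ref) 2  -- int(len(ref)/2) (nonnegative, so trunc = floor)
  let found :=
    (PySem.List.pyRange (-h) (h + 1) 1).foldl
      (fun (f : Int × Int × Int × Int) i =>
        (if check_unit (x + i) (y + i) values ((PySem.Str.pyGet? ref (i + h)).map String.singleton) then f.1 + 1 else f.1,
         if check_unit (x - i) (y - i) values ((PySem.Str.pyGet? ref (i + h)).map String.singleton) then f.2.1 + 1 else f.2.1,
         if check_unit (x + i) (y - i) values ((PySem.Str.pyGet? ref (i + h)).map String.singleton) then f.2.2.1 + 1 else f.2.2.1,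
         if check_unit (x - i) (y + i) values ((PySem.Str.pyGet? ref (i + h)).map String.singleton) then f.2.2.2 + 1 else f.2.2.2))
      (0, 0, 0, 0)
  decide (2 ≤ (List.filter (fun v => v == PySem.Str.len ref)
      [found.1, found.2.1, found.2.2.1, found.2.2.2]).length)

-- ===== PORT B =====
def pvCell (values : List (List String)) (cx : Int) (cy : Int) : Option String :=
  -- B's cell: None when (cx, cy) is outside the width×height box; values[cy][cx] via bounds-checked pyGet?
  -- (width = len(values[0]) if values else 0, which is (values.headD []).length)
  if 0 ≤ cx ∧ cx < ((values.headD []).length : Int) ∧ 0 ≤ cy ∧ cy < (values.length : Int) then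
    (PySem.List.pyGet? values cy).bind (fun row => PySem.List.pyGet? row cx)
  else none

def check_neighbors2_alt (values : List (List String)) (x : Int) (y : Int) (ref : String) : Bool :=
  let half : Int := PySem.Int.floordiv (PySem.Str.len ref) 2
  let idxs := PySem.List.pyRange (-half) (half + 1) 1
  let dmain := idxs.map (fun i => pvCell values (x + i) (y + i))
  let danti := idxs.map (fun i => pvCell values (x + i) (y - i))
  let target := ref.toList.map (fun c => some (String.singleton c))
  let count : Int :=
    (if dmain = target then 1 else 0) + (if dmain = target.reverse then 1 else 0) +
    (if danti = target then 1 else 0) + (if danti = target.reverse then 1 else 0)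
  decide (2 ≤ count)

-- ===== PRECONDITION & SPEC =====
-- Pre_ is exactly where A returns normally: it excludes even-length ref (including ""), on which
-- A raises IndexError at ref[len(ref)], and the inputs where the scanned window hits a cell whose
-- column passes the row-0 width check but lies beyond the actual (shorter) row, where A raises
-- IndexError on values[y][x]. Row b of the window is reached only at columns x ± (b - y).
def Pre_check_neighbors2 (values : List (List String)) (x : Int) (y : Int) (ref : String) : Prop :=
  PySem.Int.mod (PySem.Str.len ref) 2 = 1 ∧
  ∀ b ∈ PySem.List.pyRange (y - PySem.Int.floordiv (PySem.Str.len ref) 2)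
      (y + PySem.Int.floordiv (PySem.Str.len ref) 2 + 1) 1,
    0 ≤ b → b < (values.length : Int) →
      ∀ a ∈ [x + (b - y), x - (b - y)],
        0 ≤ a → a < ((values.headD []).length : Int) →
          a < (((values[b.toNat]?).getD []).length : Int)
instance (values : List (List String)) (x : Int) (y : Int) (ref : String) : Decidable (Pre_check_neighbors2 values x y ref) := by unfold Pre_check_neighbors2; infer_instance

def pvWitness_check_neighbors2 : List (List String) × Int × Int × String := ([["A"]], 0, 0, "A")

def Spec_check_neighbors2 (values : List (List String)) (x : Int) (y : Int) (ref : String) (out : Bool) : Prop := out = check_neighbors2_alt values x y ref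
instance (values : List (List String)) (x : Int) (y : Int) (ref : String) (out : Bool) : Decidable (Spec_check_neighbors2 values x y ref out) := by unfold Spec_check_neighbors2; infer_instance

-- ===== CLAIM (what is proved, stated in full; the proofs are below) =====
def Claim_equal_check_neighbors2 : Prop := ∀ (values : List (List String)) (x : Int) (y : Int) (ref : String), Dom_check_neighbors2 values x y ref → Pre_check_neighbors2 values x y ref → Spec_check_neighbors2 values x y ref (check_neighbors2 values x y ref)

-- ===== LEMMAS AND PROOFS =====

theorem pv_foldA (p0 p1 p2 p3 : Int → Bool) (L : List Int) (a b c d : Int) :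
    L.foldl
      (fun (f : Int × Int × Int × Int) i =>
        (if p0 i then f.1 + 1 else f.1,
         if p1 i then f.2.1 + 1 else f.2.1,
         if p2 i then f.2.2.1 + 1 else f.2.2.1,
         if p3 i then f.2.2.2 + 1 else f.2.2.2))
      (a, b, c, d)
    = (a + L.countP p0, b + L.countP p1, c + L.countP p2, d + L.countP p3) := by
  induction L generalizing a b c d with
  | nil => simp
  | cons i L ih =>
    simp only [List.foldl_cons, List.countP_cons, ih]
    split_ifs <;> simp_all [Prod.mk.injEq] <;> omega

theorem pv_forall_lt_rev (N : Nat) (Q : Nat → Prop) :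
    (∀ k, k < N → Q (N - 1 - k)) ↔ (∀ k, k < N → Q k) := by
  constructor <;> intro h k hk
  · have := h (N - 1 - k) (by omega)
    rwa [show N - 1 - (N - 1 - k) = k by omega] at this
  · exact h _ (by omega)

-- A's check_unit and B's cell read are the same bounds-guarded lookup.
theorem pv_unit_cell (values : List (List String)) (a b : Int) (s : String) :
    (check_unit a b values (some s) = true) ↔ pvCell values a b = some s := by
  unfold check_unit pvCell
  by_cases hg : 0 ≤ a ∧ a < ((values.headD []).length : Int) ∧ 0 ≤ b ∧ b < (values.length : Int)
  · rw [if_neg (by omega), if_pos hg]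
    simp [beq_iff_eq]
  · rw [if_pos (by omega), if_neg hg]
    simp

def pvIdx (N H : Nat) : List Int := (List.range N).map (fun k : Nat => -(H:Int) + (k:Int))

theorem pv_map_pvIdx_eq_iff {α : Type} (N H : Nat) (F : Int → α) (d : α) (t : List α) (ht : t.length = N) :
    (List.map F (pvIdx N H) = t) ↔ ∀ k, k < N → F (-(H:Int) + (k:Int)) = t.getD k d := by
  rw [pvIdx, List.map_map]
  constructor
  · intro h k hk
    rw [← h, List.getD_eq_getElem _ _ (by simp [hk])]
    simp only [List.getElem_map, List.getElem_range, Function.comp_apply]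
  · intro h
    apply List.ext_getElem (by simp [ht])
    intro k h1 h2
    have hk : k < N := by simpa using h1
    have hh := h k hk
    rw [List.getD_eq_getElem t d h2] at hh
    simp only [List.getElem_map, List.getElem_range, Function.comp_apply]
    exact hh

theorem pv_getD_reverse {α : Type} (t : List α) (d : α) (k : Nat) (hk : k < t.length) :
    t.reverse.getD k d = t.getD (t.length - 1 - k) d := by
  rw [List.getD_eq_getElem _ _ (by simpa using hk), List.getD_eq_getElem _ _ (by omega)]
  simp [List.getElem_reverse]

theorem pv_count_pvIdx_eq_iff (N H : Nat) (q : Int → Bool) :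
    ((0 : Int) + (List.countP q (pvIdx N H) : Int) = ((N : Nat) : Int)) ↔
      ∀ k, k < N → q (-(H:Int) + (k:Int)) = true := by
  rw [pvIdx, List.countP_map]
  have hle : List.countP (q ∘ fun k : Nat => -(H:Int) + (k:Int)) (List.range N) ≤ N := by
    simpa using List.countP_le_length (l := List.range N) (p := q ∘ fun k : Nat => -(H:Int) + (k:Int))
  constructor
  · intro h k hk
    have heq : List.countP (q ∘ fun k : Nat => -(H:Int) + (k:Int)) (List.range N) = (List.range N).length := by
      simp only [List.length_range]; omega
    simpa only [Function.comp_apply] using List.countP_eq_length.mp heq k (List.mem_range.mpr hk)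
  · intro h
    have heq : List.countP (q ∘ fun k : Nat => -(H:Int) + (k:Int)) (List.range N) = (List.range N).length :=
      List.countP_eq_length.mpr
        (by intro a ha; simpa only [Function.comp_apply] using h a (List.mem_range.mp ha))
    rw [heq]; simp

theorem pv_filter4 (a0 a1 a2 a3 n : Int) :
    (2 ≤ (List.filter (fun v => v == n) [a0, a1, a2, a3]).length) ↔
      2 ≤ (if a0 = n then (1:Int) else 0) + (if a1 = n then 1 else 0) +
          (if a2 = n then 1 else 0) + (if a3 = n then 1 else 0) := by
  by_cases h0 : a0 = n <;> by_cases h1 : a1 = n <;> by_cases h2 : a2 = n <;> by_cases h3 : a3 = n <;>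
    simp [h0, h1, h2, h3]

theorem pv_ite_int {p q : Prop} [Decidable p] [Decidable q] (h : p ↔ q) :
    (if p then (1:Int) else 0) = if q then 1 else 0 := by
  split_ifs with h1 h2 <;> tauto

-- ===== VERDICT (by name: the statement is the Claim_ definition above) =====
theorem check_neighbors2_spec : Claim_equal_check_neighbors2 := by
  intro values x y ref _ hpre
  obtain ⟨hodd, -⟩ := hpre
  have hlen : PySem.Str.len ref = (ref.toList.length : Int) := PySem.Str.len_eq ref
  have hoddN : ref.toList.length % 2 = 1 := by
    rw [hlen] at hodd
    have h2 : PySem.Int.mod ((ref.toList.length : Nat) : Int) 2 = ((ref.toList.length % 2 : Nat) : Int) := by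
      exact_mod_cast PySem.Int.mod_natCast ref.toList.length 2
    rw [h2] at hodd
    omega
  have hfd : PySem.Int.floordiv (PySem.Str.len ref) 2 = ((ref.toList.length / 2 : Nat) : Int) := by
    rw [hlen]; exact_mod_cast PySem.Int.floordiv_natCast ref.toList.length 2
  set N := ref.toList.length with hNdef
  set H := N / 2 with hHdef
  have hNe : N = 2 * H + 1 := by omega
  have hL : PySem.List.pyRange (-(H:Int)) ((H:Int) + 1) 1 = pvIdx N H := by
    rw [PySem.List.pyRange_one, pvIdx]
    congr 2
    omega
  have htlen : (List.map (fun c => some (String.singleton c)) ref.toList).length = N := by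
    simp [hNdef]
  have htrlen : ((List.map (fun c => some (String.singleton c)) ref.toList).reverse).length = N := by
    simp [hNdef]
  have hchar : ∀ k, k < N → (PySem.Str.pyGet? ref (-(H:Int) + (k:Int) + (H:Int))).map String.singleton
      = some (String.singleton (ref.toList.getD k 'A')) := by
    intro k hk
    rw [show -(H:Int) + (k:Int) + (H:Int) = ((k:Nat):Int) by ring, PySem.Str.pyGet?_natCast,
      List.getElem?_eq_getElem (by omega), List.getD_eq_getElem _ _ (by omega)]
    rfl
  have htD : ∀ k, k < N → (List.map (fun c => some (String.singleton c)) ref.toList).getD k none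
      = some (String.singleton (ref.toList.getD k 'A')) := by
    intro k hk
    rw [List.getD_eq_getElem _ _ (by rw [htlen]; omega), List.getElem_map,
      List.getD_eq_getElem _ _ (by omega)]
  have htrD : ∀ j, j < N → ((List.map (fun c => some (String.singleton c)) ref.toList).reverse).getD j none
      = some (String.singleton (ref.toList.getD (N - 1 - j) 'A')) := by
    intro j hj
    rw [pv_getD_reverse _ _ _ (by rw [htlen]; omega), htlen]
    exact htD (N - 1 - j) (by omega)
  have hfd2 : PySem.Int.floordiv ((N : Nat) : Int) 2 = ((H : Nat) : Int) := by
    rw [← hlen]; exact hfd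
  unfold Spec_check_neighbors2 check_neighbors2 check_neighbors2_alt
  simp only [hlen, hfd2, hL, pv_foldA]
  have h0 : ((0:Int) + (List.countP (fun i => check_unit (x + i) (y + i) values
        (Option.map String.singleton (PySem.Str.pyGet? ref (i + (H:Int))))) (pvIdx N H) : Int) = (N:Int))
      ↔ (List.map (fun i => pvCell values (x + i) (y + i)) (pvIdx N H)
          = List.map (fun c => some (String.singleton c)) ref.toList) := by
    rw [pv_count_pvIdx_eq_iff, pv_map_pvIdx_eq_iff N H _ none _ htlen]
    constructor
    · intro hh k hk
      have h1 := hh k hk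
      rw [hchar k hk] at h1
      rw [htD k hk]
      exact (pv_unit_cell values _ _ _).mp h1
    · intro hh k hk
      have h1 := hh k hk
      rw [htD k hk] at h1
      rw [hchar k hk]
      exact (pv_unit_cell values _ _ _).mpr h1
  have h2 : ((0:Int) + (List.countP (fun i => check_unit (x + i) (y - i) values
        (Option.map String.singleton (PySem.Str.pyGet? ref (i + (H:Int))))) (pvIdx N H) : Int) = (N:Int))
      ↔ (List.map (fun i => pvCell values (x + i) (y - i)) (pvIdx N H)
          = List.map (fun c => some (String.singleton c)) ref.toList) := by
    rw [pv_count_pvIdx_eq_iff, pv_map_pvIdx_eq_iff N H _ none _ htlen]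
    constructor
    · intro hh k hk
      have h1' := hh k hk
      rw [hchar k hk] at h1'
      rw [htD k hk]
      exact (pv_unit_cell values _ _ _).mp h1'
    · intro hh k hk
      have h1' := hh k hk
      rw [htD k hk] at h1'
      rw [hchar k hk]
      exact (pv_unit_cell values _ _ _).mpr h1'
  have h1 : ((0:Int) + (List.countP (fun i => check_unit (x - i) (y - i) values
        (Option.map String.singleton (PySem.Str.pyGet? ref (i + (H:Int))))) (pvIdx N H) : Int) = (N:Int))
      ↔ (List.map (fun i => pvCell values (x + i) (y + i)) (pvIdx N H)
          = (List.map (fun c => some (String.singleton c)) ref.toList).reverse) := by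
    rw [pv_count_pvIdx_eq_iff, pv_map_pvIdx_eq_iff N H _ none _ htrlen]
    rw [← pv_forall_lt_rev N (fun k => pvCell values (x + (-(H:Int) + (k:Int))) (y + (-(H:Int) + (k:Int)))
          = ((List.map (fun c => some (String.singleton c)) ref.toList).reverse).getD k none)]
    constructor
    · intro hh k hk
      have h1' := hh k hk
      rw [hchar k hk] at h1'
      rw [htrD (N - 1 - k) (by omega), show N - 1 - (N - 1 - k) = k by omega,
        show x + (-(H:Int) + ((N - 1 - k : Nat):Int)) = x - (-(H:Int) + (k:Int)) by omega,
        show y + (-(H:Int) + ((N - 1 - k : Nat):Int)) = y - (-(H:Int) + (k:Int)) by omega]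
      exact (pv_unit_cell values _ _ _).mp h1'
    · intro hh k hk
      have h1' := hh k hk
      rw [htrD (N - 1 - k) (by omega), show N - 1 - (N - 1 - k) = k by omega,
        show x + (-(H:Int) + ((N - 1 - k : Nat):Int)) = x - (-(H:Int) + (k:Int)) by omega,
        show y + (-(H:Int) + ((N - 1 - k : Nat):Int)) = y - (-(H:Int) + (k:Int)) by omega] at h1'
      rw [hchar k hk]
      exact (pv_unit_cell values _ _ _).mpr h1'
  have h3 : ((0:Int) + (List.countP (fun i => check_unit (x - i) (y + i) values
        (Option.map String.singleton (PySem.Str.pyGet? ref (i + (H:Int))))) (pvIdx N H) : Int) = (N:Int))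
      ↔ (List.map (fun i => pvCell values (x + i) (y - i)) (pvIdx N H)
          = (List.map (fun c => some (String.singleton c)) ref.toList).reverse) := by
    rw [pv_count_pvIdx_eq_iff, pv_map_pvIdx_eq_iff N H _ none _ htrlen]
    rw [← pv_forall_lt_rev N (fun k => pvCell values (x + (-(H:Int) + (k:Int))) (y - (-(H:Int) + (k:Int)))
          = ((List.map (fun c => some (String.singleton c)) ref.toList).reverse).getD k none)]
    constructor
    · intro hh k hk
      have h1' := hh k hk
      rw [hchar k hk] at h1'
      rw [htrD (N - 1 - k) (by omega), show N - 1 - (N - 1 - k) = k by omega,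
        show x + (-(H:Int) + ((N - 1 - k : Nat):Int)) = x - (-(H:Int) + (k:Int)) by omega,
        show y - (-(H:Int) + ((N - 1 - k : Nat):Int)) = y + (-(H:Int) + (k:Int)) by omega]
      exact (pv_unit_cell values _ _ _).mp h1'
    · intro hh k hk
      have h1' := hh k hk
      rw [htrD (N - 1 - k) (by omega), show N - 1 - (N - 1 - k) = k by omega,
        show x + (-(H:Int) + ((N - 1 - k : Nat):Int)) = x - (-(H:Int) + (k:Int)) by omega,
        show y - (-(H:Int) + ((N - 1 - k : Nat):Int)) = y + (-(H:Int) + (k:Int)) by omega] at h1'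
      rw [hchar k hk]
      exact (pv_unit_cell values _ _ _).mpr h1'
  rw [decide_eq_decide, pv_filter4, pv_ite_int h0, pv_ite_int h1, pv_ite_int h2, pv_ite_int h3]
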